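-- pv_equiv track=rewrite | github.com/MarwaEshra/FAERS-Database | MedRa Excel Parsing/parseSQMS.py | getNumberOfTabes
-- ===== SOURCE A (Python) =====
-- def getNumberOfTabes(line):
--     cnt = 0
--     for i in line:
--         if i == '\t':
--             cnt+=1
--         else:
--             break
--     return cnt
-- ===== SOURCE B (Python) =====
-- def getNumberOfTabes(line):
--     return len(line) - len(line.lstrip('\t'))
-- ===== Notes on version B (the rewrite author's own statement) =====
-- stated objective: idiomatic
-- what changed: Replaces the manual count-and-break loop with a single expression the length difference after stripping leading tabs with lstrip, delegating the leading-tab scan to the builtin.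
import Mathlib
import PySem

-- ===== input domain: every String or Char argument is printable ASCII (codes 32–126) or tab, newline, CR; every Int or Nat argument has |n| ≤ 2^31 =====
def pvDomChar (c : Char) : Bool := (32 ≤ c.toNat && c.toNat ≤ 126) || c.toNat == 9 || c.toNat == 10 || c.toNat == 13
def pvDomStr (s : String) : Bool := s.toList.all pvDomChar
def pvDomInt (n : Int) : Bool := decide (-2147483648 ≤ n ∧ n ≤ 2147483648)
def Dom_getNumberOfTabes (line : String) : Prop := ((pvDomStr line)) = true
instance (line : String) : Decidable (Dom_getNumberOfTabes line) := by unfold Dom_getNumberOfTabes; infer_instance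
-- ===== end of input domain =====

-- B replaces A's manual count-and-break loop with len(line) - len(line.lstrip('\t')); idiomatic, same cost.

-- ===== PORT A =====
-- A's for-loop with break: count while chars equal '\t', stop at the first other char.
def getNumberOfTabesGo : List Char → Int → Int
  | [], cnt => cnt
  | c :: rest, cnt => if c == '\t' then getNumberOfTabesGo rest (cnt + 1) else cnt

def getNumberOfTabes (line : String) : Int := getNumberOfTabesGo line.toList 0

-- ===== PORT B =====
-- lstrip('\t') is hand-ported as dropWhile (· == '\t') (exact: strips exactly the leading tabs).
def getNumberOfTabes_alt (line : String) : Int :=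
  (line.toList.length : Int) - ((line.toList.dropWhile (· == '\t')).length : Int)

-- ===== PRECONDITION & SPEC =====
def Spec_getNumberOfTabes (line : String) (out : Int) : Prop := out = getNumberOfTabes_alt line
instance (line : String) (out : Int) : Decidable (Spec_getNumberOfTabes line out) := by unfold Spec_getNumberOfTabes; infer_instance

-- ===== CLAIM (what is proved, stated in full; the proofs are below) =====
def Claim_equal_getNumberOfTabes : Prop := ∀ (line : String), Dom_getNumberOfTabes line → Spec_getNumberOfTabes line (getNumberOfTabes line)

-- ===== LEMMAS AND PROOFS =====
theorem getNumberOfTabesGo_eq (l : List Char) (cnt : Int) :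
    getNumberOfTabesGo l cnt = cnt + ((l.takeWhile (· == '\t')).length : Int) := by
  induction l generalizing cnt with
  | nil => simp [getNumberOfTabesGo]
  | cons c rest ih =>
    by_cases h : c == '\t'
    · simp [getNumberOfTabesGo, h, ih]; push_cast; ring
    · simp [getNumberOfTabesGo, h, List.takeWhile_cons]

-- ===== VERDICT (by name: the statement is the Claim_ definition above) =====
theorem getNumberOfTabes_spec : Claim_equal_getNumberOfTabes := by
  intro line _
  unfold Spec_getNumberOfTabes getNumberOfTabes getNumberOfTabes_alt
  rw [getNumberOfTabesGo_eq]
  have h := List.takeWhile_append_dropWhile (p := (· == '\t')) (l := line.toList)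
  have hlen : (line.toList.takeWhile (· == '\t')).length
      + (line.toList.dropWhile (· == '\t')).length = line.toList.length := by
    rw [← List.length_append, h]
  omega
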